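-- pv_equiv track=rewrite | github.com/CupofJavad/Anti-Language-Encryption-Tool- | forgotten_e2ee/stego.py | _build_buckets
-- ===== SOURCE A (Python) =====
-- def _build_buckets(tokens: list[str]) -> list[list[str]]:
--     n = len(tokens)
--     if n == 0:
--         raise ValueError("Lexicon must contain at least one token")
--     buckets = []
--     for i in range(64):
--         bucket = []
--         idx = i
--         while idx < n:
--             bucket.append(tokens[idx])
--             idx += 64
--         if not bucket:
--             bucket.append(tokens[i % n])
--         buckets.append(bucket)
--     return buckets
-- ===== SOURCE B (Python) =====
-- def _build_buckets(tokens: list[str]) -> list[list[str]]: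
--     n = len(tokens)
--     if n == 0:
--         raise ValueError("Lexicon must contain at least one token")
--     buckets = [[] for _ in range(64)]
--     for j, t in enumerate(tokens):
--         buckets[j % 64].append(t)
--     for i in range(64):
--         if not buckets[i]:
--             buckets[i].append(tokens[i % n])
--     return buckets
-- ===== Notes on version B (the rewrite author's own statement) =====
-- stated objective: simpler
-- what changed: A gathers each of the 64 buckets with its own stride-64 scan over the token list; B makes one pass over the tokens, scattering tokens[j] into bucket j % 64, then fills any still-empty bucket with the tokens[i % n] fallback.
import Mathlib
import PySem

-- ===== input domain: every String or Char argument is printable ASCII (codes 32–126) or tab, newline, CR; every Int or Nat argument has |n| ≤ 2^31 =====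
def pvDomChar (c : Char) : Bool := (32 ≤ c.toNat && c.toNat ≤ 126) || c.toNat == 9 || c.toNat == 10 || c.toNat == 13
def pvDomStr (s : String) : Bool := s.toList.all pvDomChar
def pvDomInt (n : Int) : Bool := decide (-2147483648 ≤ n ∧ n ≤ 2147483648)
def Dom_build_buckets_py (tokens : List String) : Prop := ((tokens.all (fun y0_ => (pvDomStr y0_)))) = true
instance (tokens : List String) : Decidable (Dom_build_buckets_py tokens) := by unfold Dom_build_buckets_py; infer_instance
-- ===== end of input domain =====

-- B replaces A's 64 strided gather scans by a single scatter pass over the tokens (objective: simpler one-pass structure, same cost).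

-- ===== PORT A =====
-- while idx < n: bucket.append(tokens[idx]); idx += 64   (idx always in range, so getD is exact)
def strideGather (tokens : List String) (idx : Nat) : List String :=
  if h : idx < tokens.length then tokens.getD idx "" :: strideGather tokens (idx + 64)
  else []
termination_by tokens.length - idx

def build_buckets_py (tokens : List String) : List (List String) :=
  let n := tokens.length
  if n = 0 then []   -- Python raises ValueError here; excluded by Pre_
  else
    (List.range 64).foldl (fun buckets i =>
      let bucket := strideGather tokens i
      let bucket := if bucket = [] then [tokens.getD (i % n) ""] else bucket
      buckets ++ [bucket]) []

-- ===== PORT B =====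
-- one scatter step of `for j, t in enumerate(tokens): buckets[j % 64].append(t)`; state = (j, buckets)
def scatterStep (s : Nat × List (List String)) (t : String) : Nat × List (List String) :=
  (s.1 + 1, s.2.set (s.1 % 64) ((s.2.getD (s.1 % 64) []) ++ [t]))

def build_buckets_py_alt (tokens : List String) : List (List String) :=
  let n := tokens.length
  if n = 0 then []   -- Python raises ValueError here; excluded by Pre_
  else
    let buckets := (tokens.foldl scatterStep (0, List.replicate 64 [])).2
    -- `for i in range(64): if not buckets[i]: buckets[i].append(tokens[i % n])` as a map
    (List.range 64).map (fun i =>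
      let b := buckets.getD i []
      if b = [] then [tokens.getD (i % n) ""] else b)

-- ===== PRECONDITION & SPEC =====
-- Pre_ excludes exactly the empty list, on which A (and B) raise ValueError.
def Pre_build_buckets_py (tokens : List String) : Prop := tokens ≠ []
instance (tokens : List String) : Decidable (Pre_build_buckets_py tokens) := by unfold Pre_build_buckets_py; infer_instance
def pvWitness_build_buckets_py : List String := (["a"])

def Spec_build_buckets_py (tokens : List String) (out : List (List String)) : Prop := out = build_buckets_py_alt tokens
instance (tokens : List String) (out : List (List String)) : Decidable (Spec_build_buckets_py tokens out) := by unfold Spec_build_buckets_py; infer_instance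

-- ===== CLAIM (what is proved, stated in full; the proofs are below) =====
def Claim_equal_build_buckets_py : Prop := ∀ (tokens : List String), Dom_build_buckets_py tokens → Pre_build_buckets_py tokens → Spec_build_buckets_py tokens (build_buckets_py tokens)

-- ===== LEMMAS AND PROOFS =====

theorem getD_set_eq (l : List (List String)) (j i : Nat) (v d : List String) :
    (l.set j v).getD i d = if j = i ∧ j < l.length then v else l.getD i d := by
  by_cases h1 : j = i
  · subst h1
    by_cases h2 : j < l.length
    · simp [List.getD, h2]
    · simp [List.getD, h2]
  · simp [List.getD, h1]

-- appending one token extends exactly the bucket whose residue matches ts.length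
theorem strideGather_append (ts : List String) (t : String) (idx : Nat) :
    strideGather (ts ++ [t]) idx =
      strideGather ts idx ++
        (if idx ≤ ts.length ∧ ts.length % 64 = idx % 64 then [t] else []) := by
  rcases lt_trichotomy idx ts.length with h | h | h
  · have hl : idx < (ts ++ [t]).length := by
      simp only [List.length_append, List.length_cons, List.length_nil]; omega
    conv_lhs => rw [strideGather.eq_def]
    conv_rhs => rw [strideGather.eq_def]
    rw [dif_pos hl, dif_pos h, List.getD_append _ _ _ _ h,
      strideGather_append ts t (idx + 64)]
    simp only [List.cons_append]
    exact congrArg _ (congrArg _ (if_congr (by omega) rfl rfl))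
  · subst h
    conv_lhs => rw [strideGather.eq_def]
    rw [dif_pos (by simp)]
    conv_lhs => rw [strideGather.eq_def]
    rw [dif_neg (by simp only [List.length_append, List.length_cons, List.length_nil]; omega)]
    conv_rhs => rw [strideGather.eq_def]
    rw [dif_neg (lt_irrefl _)]
    rw [if_pos ⟨le_refl _, rfl⟩]
    simp [List.getD]
  · conv_lhs => rw [strideGather.eq_def]
    conv_rhs => rw [strideGather.eq_def]
    rw [dif_neg (by simp only [List.length_append, List.length_cons, List.length_nil]; omega),
      dif_neg (by omega), if_neg (by omega)]
    simp
termination_by ts.length - idx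
decreasing_by omega

theorem scatter_fst (ts : List String) (j : Nat) (bs : List (List String)) :
    (ts.foldl scatterStep (j, bs)).1 = j + ts.length := by
  induction ts generalizing j bs with
  | nil => simp
  | cons t ts ih => simp [scatterStep, ih]; omega

theorem scatter_len (ts : List String) (j : Nat) (bs : List (List String)) :
    (ts.foldl scatterStep (j, bs)).2.length = bs.length := by
  induction ts generalizing j bs with
  | nil => simp
  | cons t ts ih => simp [scatterStep, ih]

-- main invariant: the scatter pass builds exactly the strided buckets
theorem scatter_getD (ts : List String) (i : Nat) (hi : i < 64) :
    ((ts.foldl scatterStep (0, List.replicate 64 ([] : List String))).2).getD i [] =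
      strideGather ts i := by
  induction ts using List.reverseRecOn with
  | nil =>
    rw [strideGather.eq_def, dif_neg (by simp)]
    simp only [List.foldl_nil, List.getD, List.getElem?_replicate]
    split <;> rfl
  | append_singleton ts t ih =>
    rw [List.foldl_append, List.foldl_cons, List.foldl_nil]
    have hfst := scatter_fst ts 0 (List.replicate 64 ([] : List String))
    have hlen := scatter_len ts 0 (List.replicate 64 ([] : List String))
    simp only [Nat.zero_add] at hfst
    simp only [List.length_replicate] at hlen
    simp only [scatterStep, hfst]
    rw [getD_set_eq, hlen, strideGather_append]
    by_cases hc : ts.length % 64 = i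
    · rw [if_pos ⟨hc, by omega⟩, if_pos (by omega), hc, ih]
    · rw [if_neg (by omega), if_neg (by omega), List.append_nil, ih]

theorem foldl_append_eq_map (xs : List Nat) (f : Nat → List String)
    (a : List (List String)) :
    xs.foldl (fun acc i => acc ++ [f i]) a = a ++ xs.map f := by
  induction xs generalizing a with
  | nil => simp
  | cons x xs ih => simp [ih]

-- ===== VERDICT (by name: the statement is the Claim_ definition above) =====
theorem build_buckets_py_spec : Claim_equal_build_buckets_py := by
  intro tokens _ hpre
  unfold Spec_build_buckets_py build_buckets_py build_buckets_py_alt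
  have hn : tokens.length ≠ 0 := by simpa [List.length_eq_zero_iff] using hpre
  simp only [if_neg hn]
  rw [foldl_append_eq_map]
  simp only [List.nil_append]
  apply List.map_congr_left
  intro i hi
  rw [scatter_getD tokens i (List.mem_range.mp hi)]
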